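-- pv_equiv track=rewrite | github.com/JUiscoming/algorithm | baekjoon/문자열/5525. IOIOI.py | count_pattern
-- ===== SOURCE A (Python) =====
-- def count_pattern(N, M, s):
--     pattern = 'IO' * N + 'I'
--     len_p = 2*N+1
--     i = 0
--     count = 0
--     while i <= (M-len_p):
--         if s[i: i+len_p] == pattern:
--             count += 1
--             i += 1
--         i += 1
--
--     return count
-- ===== SOURCE B (Python) =====
-- def count_pattern(N, M, s):
--     # Single pass: k2 = length (in 'IOI' units) of the longest unit-chain ending
--     # at position e; each e with k2 >= N is the last character of one occurrence.
--     L = min(M, len(s))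
--     count = 0
--     k1 = 0  # chain length ending at e-2
--     k2 = 0  # chain length ending at e-1
--     for e in range(2, L):
--         k1, k2 = k2, (k1 + 1 if s[e-2] == 'I' and s[e-1] == 'O' and s[e] == 'I' else 0)
--         if k2 >= N:
--             count += 1
--     return count
-- ===== Notes on version B (the rewrite author's own statement) =====
-- stated objective: alternative
-- what changed: Replaced the slide-and-compare loop (build the 2N+1-char pattern, slice s at every start position and compare) by a single left-to-right pass that maintains the length of the current chain of overlapping 'IOI' units and counts every position where the chain reaches N; this avoids re-scanning the pattern at each start (O(M*N) worst case vs O(min(M,len(s)))), though on random inputs where A's loop bound M-2N-1 is small A exits immediately and a timing run shows no speed-up.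
-- outside the precondition, e.g. on count_pattern(0, 2, 'II'): A returns 1, B returns 0; on count_pattern(-1, 3, 'III'): A returns 0, B returns 1
import Mathlib
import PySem

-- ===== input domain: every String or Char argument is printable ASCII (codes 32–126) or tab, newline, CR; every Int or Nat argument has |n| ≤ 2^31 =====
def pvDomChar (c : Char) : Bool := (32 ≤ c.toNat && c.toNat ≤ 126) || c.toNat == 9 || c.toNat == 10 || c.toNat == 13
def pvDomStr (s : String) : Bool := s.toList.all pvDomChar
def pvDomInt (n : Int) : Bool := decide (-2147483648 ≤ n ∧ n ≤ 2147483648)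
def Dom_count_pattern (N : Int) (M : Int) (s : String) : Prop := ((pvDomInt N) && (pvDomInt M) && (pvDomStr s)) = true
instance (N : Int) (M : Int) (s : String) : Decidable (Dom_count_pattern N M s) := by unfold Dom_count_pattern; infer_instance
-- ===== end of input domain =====

-- B replaces A's slide-and-compare (build the 2N+1-char pattern, slice s at every
-- start position, compare) by a single left-to-right pass maintaining the length of
-- the current chain of overlapping 'IOI' units (objective: alternative algorithm).

-- ===== PORT A =====
-- A's while-loop as fuel recursion; fuel bounds the number of loop iterations
def countA_loop (pattern : List Char) (len_p M : Int) (tl : List Char) : Nat → Int → Int → Int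
  | 0, _, count => count
  | fuel+1, i, count =>
    if i ≤ M - len_p then
      if PySem.List.slice tl (some i) (some (i + len_p)) = pattern then
        countA_loop pattern len_p M tl fuel (i+2) (count+1)
      else
        countA_loop pattern len_p M tl fuel (i+1) count
    else count

def count_pattern (N : Int) (M : Int) (s : String) : Int :=
  let pattern : List Char := (List.replicate N.toNat ['I', 'O']).flatten ++ ['I']  -- 'IO'*N + 'I'
  let len_p : Int := 2*N+1
  countA_loop pattern len_p M s.toList (M - len_p + 1).toNat 0 0

-- ===== PORT B =====
-- one step of B's for-loop over e: state (count, k1, k2); k1/k2 = chain lengths at e-2/e-1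
def bStep (N : Int) (tl : List Char) (st : Int × Int × Int) (e : Int) : Int × Int × Int :=
  let k1 := st.2.1
  let k2' : Int :=
    if PySem.List.pyGet? tl (e-2) = some 'I' ∧ PySem.List.pyGet? tl (e-1) = some 'O' ∧
        PySem.List.pyGet? tl e = some 'I' then k1 + 1 else 0
  (if N ≤ k2' then st.1 + 1 else st.1, st.2.2, k2')

def count_pattern_alt (N : Int) (M : Int) (s : String) : Int :=
  let tl := s.toList
  let L : Int := min M (tl.length : Int)
  ((PySem.List.pyRange 2 L 1).foldl (bStep N tl) (0, 0, 0)).1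

-- ===== PRECONDITION & SPEC =====
-- Pre_ excludes N ≤ 0, where the pattern 'IO'*N+'I' degenerates ('IO'*N is empty):
-- there A's value is an accident of its skip-after-match and negative-length-slice
-- comparison, and B's chain count is not meaningful either (see claim cites).
def Pre_count_pattern (N : Int) (M : Int) (s : String) : Prop := 1 ≤ N
instance (N : Int) (M : Int) (s : String) : Decidable (Pre_count_pattern N M s) := by
  unfold Pre_count_pattern; infer_instance

def pvWitness_count_pattern : Int × Int × String := (1, 5, "IOIOI")

def Spec_count_pattern (N : Int) (M : Int) (s : String) (out : Int) : Prop := out = count_pattern_alt N M s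
instance (N : Int) (M : Int) (s : String) (out : Int) : Decidable (Spec_count_pattern N M s out) := by unfold Spec_count_pattern; infer_instance

-- ===== CLAIM (what is proved, stated in full; the proofs are below) =====
def Claim_equal_count_pattern : Prop := ∀ (N : Int) (M : Int) (s : String), Dom_count_pattern N M s → Pre_count_pattern N M s → Spec_count_pattern N M s (count_pattern N M s)

-- ===== LEMMAS AND PROOFS =====

-- an 'IOI' unit starting at index j
def unitAt (tl : List Char) (j : Nat) : Bool :=
  (tl[j]? == some 'I') && (tl[j+1]? == some 'O') && (tl[j+2]? == some 'I')

-- length (in units) of the longest chain of overlapping 'IOI' units ending at e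
def chain (tl : List Char) : Nat → Nat
  | 0 => 0
  | 1 => 0
  | (e+2) => if unitAt tl e then chain tl e + 1 else 0

def patternL (n : Nat) : List Char := (List.replicate n ['I', 'O']).flatten ++ ['I']

def matchB (tl : List Char) (n j : Nat) : Bool := decide ((tl.drop j).take (2*n+1) = patternL n)

-- A-side counted predicate: start j is within A's bound and the slice matches
def Pb (tl : List Char) (n : Nat) (M : Int) (j : Nat) : Bool :=
  decide ((j : Int) ≤ M - (2*(n:Int)+1)) && matchB tl n j

-- B-side counted predicate: the chain ending at e has length ≥ n
def Qb (tl : List Char) (n e : Nat) : Bool := decide (n ≤ chain tl e)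

lemma take_drop_cons (tl : List Char) (i m : Nat) (c : Char) (r : List Char) :
    (tl.drop i).take (m+1) = c :: r ↔ tl[i]? = some c ∧ (tl.drop (i+1)).take m = r := by
  rcases h : tl.drop i with _ | ⟨x, xs⟩
  · have hlen : tl.length ≤ i := by
      have h2 := congrArg List.length h
      simp at h2; omega
    simp [List.getElem?_eq_none hlen]
  · have h0 : tl[i]? = some x := by
      have h3 : (tl.drop i)[0]? = tl[i+0]? := List.getElem?_drop ..
      simp [h] at h3; simp [h3.symm]
    have h1 : tl.drop (i+1) = xs := by
      have h4 : tl.drop (i+1) = (tl.drop i).drop 1 := by rw [List.drop_drop]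
      simp [h4, h]
    simp [h, h1, h0, List.take_succ_cons]

lemma patternL_succ (n : Nat) : patternL (n+1) = 'I' :: 'O' :: patternL n := by
  simp [patternL, List.replicate_succ]

lemma match_iff_pairs (tl : List Char) (n : Nat) : ∀ j,
    (matchB tl n j = true ↔
      ((∀ m < n, tl[j+2*m]? = some 'I' ∧ tl[j+2*m+1]? = some 'O') ∧ tl[j+2*n]? = some 'I')) := by
  induction n with
  | zero =>
    intro j
    simp only [matchB, patternL, decide_eq_true_eq]
    constructor
    · intro h
      have := (take_drop_cons tl j 0 'I' []).mp (by simpa using h)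
      simp [this.1]
    · intro h
      have : (tl.drop j).take 1 = 'I' :: [] :=
        (take_drop_cons tl j 0 'I' []).mpr ⟨by simpa using h.2, by simp⟩
      simpa using this
  | succ n ih =>
    intro j
    have hdec : matchB tl (n+1) j = true ↔
        (tl[j]? = some 'I' ∧ tl[j+1]? = some 'O' ∧ matchB tl n (j+2) = true) := by
      simp only [matchB, decide_eq_true_eq, patternL_succ]
      have h1 : 2*(n+1)+1 = (2*n+2)+1 := by ring
      rw [h1, take_drop_cons]
      constructor
      · rintro ⟨hI, h2⟩
        have := (take_drop_cons tl (j+1) (2*n+1) 'O' (patternL n)).mp h2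
        exact ⟨hI, this.1, this.2⟩
      · rintro ⟨hI, hO, h3⟩
        exact ⟨hI, (take_drop_cons tl (j+1) (2*n+1) 'O' (patternL n)).mpr ⟨hO, h3⟩⟩
    rw [hdec, ih (j+2)]
    constructor
    · rintro ⟨hI, hO, ⟨hp, hf⟩⟩
      refine ⟨?_, ?_⟩
      · intro m hm
        rcases Nat.eq_zero_or_pos m with rfl | hpos
        · simpa using ⟨hI, hO⟩
        · have hthis := hp (m-1) (by omega)
          have e1 : j+2+2*(m-1) = j+2*m := by omega
          have e2 : j+2+2*(m-1)+1 = j+2*m+1 := by omega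
          refine ⟨?_, ?_⟩
          · rw [← e1]; exact hthis.1
          · rw [← e2]; exact hthis.2
      · have e3 : j+2+2*n = j+2*(n+1) := by ring
        rw [← e3]; exact hf
    · rintro ⟨hp, hf⟩
      have h0 := hp 0 (by omega)
      refine ⟨by simpa using h0.1, by simpa using h0.2, ⟨?_, ?_⟩⟩
      · intro m hm
        have hthis := hp (m+1) (by omega)
        have e1 : j+2*(m+1) = j+2+2*m := by ring
        have e2 : j+2*(m+1)+1 = j+2+2*m+1 := by ring
        rw [e1] at hthis
        exact hthis
      · have e3 : j+2*(n+1) = j+2+2*n := by ring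
        rw [e3] at hf; exact hf

lemma pairs_iff_units (tl : List Char) (n j : Nat) :
    ((∀ m < n, tl[j+2*m]? = some 'I' ∧ tl[j+2*m+1]? = some 'O') ∧ tl[j+2*n]? = some 'I') ↔
      ((∀ m < n, unitAt tl (j+2*m) = true) ∧ tl[j+2*n]? = some 'I') := by
  simp only [unitAt, Bool.and_eq_true, beq_iff_eq]
  constructor
  · rintro ⟨hp, hf⟩
    refine ⟨?_, hf⟩
    intro m hm
    refine ⟨⟨(hp m hm).1, (hp m hm).2⟩, ?_⟩
    rcases Nat.lt_or_ge (m+1) n with h | h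
    · have hthis := (hp (m+1) h).1
      have e : j+2*(m+1) = j+2*m+2 := by ring
      rwa [e] at hthis
    · have e2 : j+2*m+2 = j+2*n := by omega
      rw [e2]; exact hf
  · rintro ⟨hu, hf⟩
    exact ⟨fun m hm => ⟨(hu m hm).1.1, (hu m hm).1.2⟩, hf⟩

lemma le_chain_iff (tl : List Char) (j : Nat) : ∀ n,
    (n ≤ chain tl (j + 2*n) ↔ ∀ m < n, unitAt tl (j+2*m) = true) := by
  intro n
  induction n with
  | zero => simp
  | succ n ih =>
    have e : j + 2*(n+1) = (j + 2*n) + 2 := by ring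
    rw [e, chain]
    by_cases hu : unitAt tl (j+2*n) = true
    · simp only [hu, if_true]
      constructor
      · intro h
        intro m hm
        rcases Nat.lt_or_ge m n with h2 | h2
        · exact (ih.mp (by omega)) m h2
        · have : m = n := by omega
          rwa [this]
      · intro h
        have := ih.mpr (fun m hm => h m (by omega))
        omega
    · rw [if_neg hu]
      constructor
      · omega
      · intro h; exact absurd (h n (by omega)) hu

lemma match_iff_chain (tl : List Char) (n j : Nat) (hn : 1 ≤ n) :
    matchB tl n j = true ↔ n ≤ chain tl (j + 2*n) := by
  rw [match_iff_pairs tl n j, pairs_iff_units, le_chain_iff]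
  constructor
  · exact fun h => h.1
  · intro h
    refine ⟨h, ?_⟩
    have := h (n-1) (by omega)
    simp only [unitAt, Bool.and_eq_true, beq_iff_eq] at this
    have e : j+2*(n-1)+2 = j+2*n := by omega
    rw [e] at this
    exact this.2

lemma two_mul_chain_le (tl : List Char) : ∀ e, 2 * chain tl e ≤ e := by
  intro e
  induction e using Nat.strong_induction_on with
  | _ e ih =>
    match e with
    | 0 => simp [chain]
    | 1 => simp [chain]
    | (e+2) =>
      rw [chain]
      split
      · have := ih e (by omega); omega
      · omega

lemma match_lt_length (tl : List Char) (n j : Nat) (h : matchB tl n j = true) :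
    j + 2*n < tl.length := by
  have := ((match_iff_pairs tl n j).mp h).2
  exact (List.getElem?_eq_some_iff.mp this).1

lemma no_adjacent (tl : List Char) (n j : Nat) (hn : 1 ≤ n) (h : matchB tl n j = true) :
    matchB tl n (j+1) = false := by
  by_contra hc
  have h2 : matchB tl n (j+1) = true := by revert hc; cases matchB tl n (j+1) <;> simp
  have hO := (((match_iff_pairs tl n j).mp h).1 0 (by omega)).2
  simp only [Nat.mul_zero, Nat.add_zero] at hO
  rcases Nat.lt_or_ge 1 n with hgt | hle
  · have hI := (((match_iff_pairs tl n (j+1)).mp h2).1 0 (by omega)).1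
    simp only [Nat.mul_zero, Nat.add_zero] at hI
    rw [hO] at hI
    simp at hI
  · have e : n = 1 := by omega
    subst e
    have hI := ((match_iff_pairs tl 1 (j+1)).mp h2).1 0 (by omega)
    simp only [Nat.mul_zero, Nat.add_zero] at hI
    rw [hO] at hI
    simp at hI

lemma countP_window (p : Nat → Bool) (a ℓ K : Nat)
    (hw : ∀ e, p e = true → a ≤ e ∧ e < a + ℓ) (hK : a + ℓ ≤ K) :
    (List.range' a ℓ).countP p = (List.range K).countP p := by
  have hA : List.range' 0 a ++ List.range' a ℓ = List.range' 0 (a+ℓ) := by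
    simpa using @List.range'_append 0 a ℓ 1
  have hB : List.range' 0 (a+ℓ) ++ List.range' (a+ℓ) (K-(a+ℓ)) = List.range' 0 K := by
    have h := @List.range'_append 0 (a+ℓ) (K-(a+ℓ)) 1
    simp only [Nat.zero_add, Nat.one_mul] at h
    rw [h]
    congr 1
    omega
  have h1 : List.range K = List.range' 0 a ++ List.range' a ℓ ++ List.range' (a+ℓ) (K-(a+ℓ)) := by
    rw [List.range_eq_range', ← hB, ← hA]
  rw [h1, List.countP_append, List.countP_append]
  have z1 : (List.range' 0 a).countP p = 0 := by
    rw [List.countP_eq_zero]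
    intro x hx
    have := List.mem_range'_1.mp hx
    intro hpx
    have := hw x hpx
    omega
  have z2 : (List.range' (a+ℓ) (K-(a+ℓ))).countP p = 0 := by
    rw [List.countP_eq_zero]
    intro x hx
    have := List.mem_range'_1.mp hx
    intro hpx
    have := hw x hpx
    omega
  omega

lemma slice_matchB (tl : List Char) (n : Nat) (i : Int) (hi : 0 ≤ i) :
    (PySem.List.slice tl (some i) (some (i + (2*(n:Int)+1))) = patternL n) ↔ matchB tl n i.toNat = true := by
  have hi' : ((i.toNat : Nat) : Int) = i := Int.toNat_of_nonneg hi
  have hcast : (((2*n+1 : Nat)) : Int) = 2*(n:Int)+1 := by push_cast; ring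
  rw [← hi', ← hcast, PySem.List.slice_natCast_add]
  simp [matchB, max_eq_left hi]

lemma countP_zero_of_big (tl : List Char) (n : Nat) (M : Int) (i : Int) (hi : 0 ≤ i)
    (hbig : M - (2*(n:Int)+1) < i) :
    (List.range' i.toNat (tl.length - i.toNat)).countP (Pb tl n M) = 0 := by
  rw [List.countP_eq_zero]
  intro j hj
  have hmem := List.mem_range'_1.mp hj
  simp only [Pb, Bool.and_eq_true, decide_eq_true_eq]
  rintro ⟨hb, -⟩
  omega

lemma Aloop_eq (tl : List Char) (n : Nat) (M : Int) (hn : 1 ≤ n) :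
    ∀ (fuel : Nat) (i c : Int), 0 ≤ i → M - (2*(n:Int)+1) + 1 - i ≤ (fuel : Int) →
    countA_loop (patternL n) (2*(n:Int)+1) M tl fuel i c
      = c + ((List.range' i.toNat (tl.length - i.toNat)).countP (Pb tl n M) : Int) := by
  intro fuel
  induction fuel with
  | zero =>
    intro i c hi hf
    simp only [countA_loop]
    rw [countP_zero_of_big tl n M i hi (by push_cast at hf; omega)]
    simp
  | succ fuel ih =>
    intro i c hi hf
    simp only [countA_loop]
    by_cases hg : i ≤ M - (2*(n:Int)+1)
    · rw [if_pos hg]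
      by_cases hm : PySem.List.slice tl (some i) (some (i + (2*(n:Int)+1))) = patternL n
      · rw [if_pos hm]
        have hmB : matchB tl n i.toNat = true := (slice_matchB tl n i hi).mp hm
        rw [ih (i+2) (c+1) (by omega) (by push_cast at hf ⊢; omega)]
        have hlen : i.toNat + 2*n < tl.length := match_lt_length tl n i.toNat hmB
        have hsplit : List.range' i.toNat (tl.length - i.toNat)
            = i.toNat :: (i.toNat+1) :: List.range' (i.toNat+2) (tl.length - (i.toNat+2)) := by
          have e : tl.length - i.toNat = ((tl.length - (i.toNat+2)) + 1) + 1 := by omega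
          rw [e, List.range'_succ, List.range'_succ]
        have hP1 : Pb tl n M i.toNat = true := by
          simp only [Pb, Bool.and_eq_true, decide_eq_true_eq]
          exact ⟨by omega, hmB⟩
        have hP2 : Pb tl n M (i.toNat+1) = false := by
          simp only [Pb, Bool.and_eq_false_iff]
          right
          exact no_adjacent tl n i.toNat hn hmB
        have hi2 : (i+2).toNat = i.toNat + 2 := by omega
        rw [hsplit, List.countP_cons, List.countP_cons, hP1, hP2, hi2]
        simp
        omega
      · rw [if_neg hm]
        have hmB : matchB tl n i.toNat = false := by
          rcases h : matchB tl n i.toNat with _ | _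
          · rfl
          · exact absurd ((slice_matchB tl n i hi).mpr h) hm
        rw [ih (i+1) c (by omega) (by push_cast at hf ⊢; omega)]
        have hi1 : (i+1).toNat = i.toNat + 1 := by omega
        rw [hi1]
        rcases Nat.lt_or_ge i.toNat tl.length with hlt | hge
        · have hsplit : List.range' i.toNat (tl.length - i.toNat)
              = i.toNat :: List.range' (i.toNat+1) (tl.length - (i.toNat+1)) := by
            have e : tl.length - i.toNat = (tl.length - (i.toNat+1)) + 1 := by omega
            rw [e, List.range'_succ]
          have hP : Pb tl n M i.toNat = false := by
            simp only [Pb, Bool.and_eq_false_iff]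
            right; exact hmB
          rw [hsplit, List.countP_cons, hP]
          simp
        · have e1 : tl.length - i.toNat = 0 := by omega
          have e2 : tl.length - (i.toNat+1) = 0 := by omega
          rw [e1, e2]
          simp
    · rw [if_neg hg]
      rw [countP_zero_of_big tl n M i hi (by omega)]
      simp

lemma Bfold_eq (tl : List Char) (n : Nat) (L : Int) (hL : L ≤ (tl.length : Int)) :
    ∀ (d : Nat) (e c k1 k2 : Int), 2 ≤ e → (L - e).toNat = d →
    k1 = (chain tl (e.toNat - 2) : Int) → k2 = (chain tl (e.toNat - 1) : Int) →
    ((PySem.List.pyRange e L 1).foldl (bStep (n:Int) tl) (c, k1, k2)).1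
      = c + ((List.range' e.toNat (L.toNat - e.toNat)).countP (Qb tl n) : Int) := by
  intro d
  induction d with
  | zero =>
    intro e c k1 k2 he hd hk1 hk2
    have hle : L ≤ e := by omega
    rw [PySem.List.pyRange_one_eq_nil hle]
    have h0 : L.toNat - e.toNat = 0 := by omega
    rw [h0]
    simp
  | succ d ih =>
    intro e c k1 k2 he hd hk1 hk2
    have hlt : e < L := by omega
    rw [PySem.List.pyRange_one_cons hlt, List.foldl_cons]
    obtain ⟨j, hj⟩ : ∃ j, e.toNat = j + 2 := ⟨e.toNat - 2, by omega⟩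
    have hcond : (PySem.List.pyGet? tl (e-2) = some 'I' ∧ PySem.List.pyGet? tl (e-1) = some 'O' ∧
        PySem.List.pyGet? tl e = some 'I') ↔ unitAt tl j = true := by
      have g1 : PySem.List.pyGet? tl (e-2) = tl[(e-2).toNat]? :=
        PySem.List.pyGet?_of_nonneg tl (by omega)
      have g2 : PySem.List.pyGet? tl (e-1) = tl[(e-1).toNat]? :=
        PySem.List.pyGet?_of_nonneg tl (by omega)
      have g3 : PySem.List.pyGet? tl e = tl[e.toNat]? :=
        PySem.List.pyGet?_of_nonneg tl (by omega)
      rw [g1, g2, g3]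
      have i1 : (e-2).toNat = j := by omega
      have i2 : (e-1).toNat = j+1 := by omega
      have i3 : e.toNat = j+2 := hj
      rw [i1, i2, i3]
      simp only [unitAt, Bool.and_eq_true, beq_iff_eq]
      tauto
    have hk2' : (if PySem.List.pyGet? tl (e-2) = some 'I' ∧ PySem.List.pyGet? tl (e-1) = some 'O' ∧
        PySem.List.pyGet? tl e = some 'I' then k1 + 1 else 0) = (chain tl (j+2) : Int) := by
      by_cases hu : unitAt tl j = true
      · rw [if_pos (hcond.mpr hu)]
        have : chain tl (j+2) = chain tl j + 1 := by rw [chain, if_pos hu]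
        rw [this, hk1]
        have : e.toNat - 2 = j := by omega
        rw [this]
        push_cast
        ring
      · rw [if_neg (fun h => hu (hcond.mp h))]
        have : chain tl (j+2) = 0 := by
          rw [chain, if_neg hu]
        rw [this]
        simp
    have hstep : bStep (n:Int) tl (c, k1, k2) e
        = ((if (n:Int) ≤ (chain tl (j+2) : Int) then c + 1 else c), k2, (chain tl (j+2) : Int)) := by
      simp only [bStep, hk2']
    rw [hstep]
    have hcount : L.toNat - e.toNat = (L.toNat - (e.toNat + 1)) + 1 := by omega
    have hrange : List.range' e.toNat (L.toNat - e.toNat)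
        = e.toNat :: List.range' (e.toNat + 1) (L.toNat - (e.toNat + 1)) := by
      rw [hcount, List.range'_succ]
    rw [ih (e+1) (if (n:Int) ≤ (chain tl (j+2) : Int) then c + 1 else c) k2 (chain tl (j+2) : Int)
        (by omega) (by omega)
        (by rw [hk2]; congr 2; omega)
        (by congr 2; omega)]
    rw [hrange, List.countP_cons]
    have hq : (Qb tl n e.toNat = true) ↔ (n:Int) ≤ (chain tl (j+2) : Int) := by
      simp only [Qb, decide_eq_true_eq, hj]
      constructor <;> intro h <;> exact_mod_cast h
    have he1 : (e+1).toNat = e.toNat + 1 := by omega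
    rw [he1]
    by_cases hge : (n:Int) ≤ (chain tl (j+2) : Int)
    · rw [if_pos hge]
      have : Qb tl n e.toNat = true := hq.mpr hge
      rw [this]
      simp
      omega
    · rw [if_neg hge]
      have : Qb tl n e.toNat = false := by
        rcases h : Qb tl n e.toNat with _|_
        · rfl
        · exact absurd (hq.mp h) hge
      rw [this]
      simp

lemma count_bridge (tl : List Char) (n : Nat) (M : Int) (hn : 1 ≤ n) :
    (List.range' 0 (tl.length - 0)).countP (Pb tl n M)
      = (List.range' 2 ((min M (tl.length : Int)).toNat - 2)).countP (Qb tl n) := by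
  set len := tl.length with hlen
  set Ln := (min M (len : Int)).toNat with hLn
  have hLn_le : Ln ≤ len := by omega
  set q : Nat → Bool := fun e => decide (e < Ln) && Qb tl n e with hq
  have hpt : ∀ j ∈ List.range' 0 (len - 0), (Pb tl n M j = true ↔ q (j + 2*n) = true) := by
    intro j hjmem
    suffices h : Pb tl n M j = q (j + 2*n) by rw [h]
    by_cases hch : n ≤ chain tl (j+2*n)
    · have hmB : matchB tl n j = true := (match_iff_chain tl n j hn).mpr hch
      have hl : j + 2*n < len := match_lt_length tl n j hmB
      have hiff : ((j:Int) ≤ M - (2*(n:Int)+1)) ↔ (j + 2*n < Ln) := by omega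
      simp only [Pb, Qb, hq, hmB, Bool.and_true, decide_eq_true hch]
      rcases Classical.em ((j:Int) ≤ M - (2*(n:Int)+1)) with h | h
      · simp [h, hiff.mp h]
      · have hnot : ¬ (j + 2*n < Ln) := fun hc => h (hiff.mpr hc)
        simp [h]
        omega
    · have hmB : matchB tl n j = false := by
        rcases h : matchB tl n j with _|_
        · rfl
        · exact absurd ((match_iff_chain tl n j hn).mp h) hch
      simp [Pb, Qb, hq, hmB, hch]
  rw [List.countP_congr hpt]
  have hmap : (List.range' 0 (len - 0)).countP (fun j => q (j + 2*n))
      = ((List.range' 0 (len - 0)).map (fun j => j + 2*n)).countP q := by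
    rw [List.countP_map]
    rfl
  rw [hmap]
  have hmap2 : (List.range' 0 (len - 0)).map (fun j => j + 2*n) = List.range' (2*n) (len - 0) := by
    have h1 : (List.range' 0 (len - 0)).map (fun j => j + 2*n)
        = (List.range' 0 (len - 0)).map (fun j => 2*n + j) := by
      apply List.map_congr_left
      intro x _
      omega
    rw [h1]
    have h2 := @List.map_add_range' (2*n) 0 (len - 0) 1
    simpa using h2
  rw [hmap2]
  have hwq : ∀ e, q e = true → n ≤ chain tl e ∧ e < Ln := by
    intro e he
    simp only [hq, Bool.and_eq_true, decide_eq_true_eq, Qb] at he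
    exact ⟨he.2, he.1⟩
  have hge2n : ∀ e, q e = true → 2*n ≤ e := by
    intro e he
    have h1 := (hwq e he).1
    have h2 := two_mul_chain_le tl e
    omega
  have hw1 : (List.range' (2*n) (len - 0)).countP q = (List.range (2*n + len)).countP q := by
    apply countP_window
    · intro e he
      refine ⟨hge2n e he, ?_⟩
      have := (hwq e he).2
      omega
    · omega
  have hw2 : (List.range' 2 (Ln - 2)).countP (Qb tl n) = (List.range (2*n + len)).countP q := by
    have hcg : ∀ e ∈ List.range' 2 (Ln - 2), (Qb tl n e = true ↔ q e = true) := by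
      intro e he
      have hm := List.mem_range'_1.mp he
      have helt : e < Ln := by omega
      simp [hq, helt]
    rw [List.countP_congr hcg]
    apply countP_window
    · intro e he
      refine ⟨by have := hge2n e he; omega, ?_⟩
      have h1 := (hwq e he).2
      have h2 := hge2n e he
      omega
    · omega
  rw [hw1, ← hw2]

-- ===== VERDICT (by name: the statement is the Claim_ definition above) =====
theorem count_pattern_spec : Claim_equal_count_pattern := by
  intro N M s hdom hpre
  unfold Spec_count_pattern
  have hN1 : (1:Int) ≤ N := hpre
  simp only [count_pattern, count_pattern_alt]
  set n : Nat := N.toNat with hn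
  have hn1 : 1 ≤ n := by omega
  have hNn : N = (n : Int) := by omega
  rw [hNn]
  rw [show (List.replicate n ['I', 'O']).flatten ++ ['I'] = patternL n from rfl]
  have hA := Aloop_eq s.toList n M hn1 (M - (2*(n:Int)+1) + 1).toNat 0 0 le_rfl
      (by simpa using Int.self_le_toNat (M - (2*(n:Int)+1) + 1))
  have hB := Bfold_eq s.toList n (min M (s.toList.length : Int)) (min_le_right _ _)
      ((min M (s.toList.length : Int) - 2).toNat) 2 0 0 0 (by omega) rfl rfl rfl
  rw [hA, hB]
  have hbr := count_bridge s.toList n M hn1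
  simp only [Nat.sub_zero] at hbr
  rw [show Int.toNat 0 = 0 from rfl, show Int.toNat 2 = 2 from rfl, Nat.sub_zero, hbr]
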